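-- pv_equiv track=rewrite | github.com/pkwgc/system | src/algo_gd.py | convert_unicode_to_chinese
-- ===== SOURCE A (Python) =====
-- def convert_unicode_to_chinese(unicode_str: str) -> str:
--     """Convert Unicode escape sequences to Chinese characters."""
--     result = []
--     i = 0
--     while i < len(unicode_str):
--         if (i + 5 < len(unicode_str) and
--             unicode_str[i] == '\\' and
--             unicode_str[i + 1] == 'u'):
--             try:
--                 unicode_substr = unicode_str[i + 2:i + 6]
--                 ch = chr(int(unicode_substr, 16))
--                 result.append(ch)
--                 i += 6
--             except ValueError:
--                 result.append(unicode_str[i])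
--                 i += 1
--         else:
--             result.append(unicode_str[i])
--             i += 1
--     return ''.join(result)
-- ===== SOURCE B (Python) =====
-- def convert_unicode_to_chinese(unicode_str: str) -> str:
--     """Convert Unicode escape sequences to Chinese characters (find-based chunk scan)."""
--     result = []
--     i = 0
--     n = len(unicode_str)
--     while True:
--         j = unicode_str.find('\\u', i)
--         if j == -1:
--             result.append(unicode_str[i:])
--             break
--         result.append(unicode_str[i:j])
--         if j + 5 < n:
--             try:
--                 result.append(chr(int(unicode_str[j + 2:j + 6], 16)))
--                 i = j + 6
--                 continue
--             except ValueError: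
--                 pass
--         result.append('\\')
--         i = j + 1
--     return ''.join(result)
-- ===== Notes on version B (the rewrite author's own statement) =====
-- stated objective: faster
-- what changed: Replaces A's one-character-at-a-time index scan by a find-based chunk scan: jump straight to the next '\u' occurrence with str.find and copy the intervening chunk wholesale (both done in C by CPython), keeping the identical int(slice,16)/chr parse and advance-by-1-on-failure semantics.
import Mathlib
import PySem

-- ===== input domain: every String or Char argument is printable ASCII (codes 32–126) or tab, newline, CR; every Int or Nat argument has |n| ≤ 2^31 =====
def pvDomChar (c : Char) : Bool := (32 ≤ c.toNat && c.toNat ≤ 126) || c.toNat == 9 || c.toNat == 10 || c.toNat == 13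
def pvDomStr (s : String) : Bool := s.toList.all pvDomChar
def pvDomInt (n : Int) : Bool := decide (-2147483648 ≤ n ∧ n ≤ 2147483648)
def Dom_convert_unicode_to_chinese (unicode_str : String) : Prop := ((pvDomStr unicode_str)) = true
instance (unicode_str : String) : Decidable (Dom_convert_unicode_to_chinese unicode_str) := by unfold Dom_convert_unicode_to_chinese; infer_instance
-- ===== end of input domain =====

-- B replaces A's one-character-at-a-time scan by a find-based chunk scan (jump to the next
-- "\u" occurrence, copy the chunk before it wholesale); same int(...,16)/chr parse, return value only.

-- ===== PORT A =====
-- chr(n): exact for 0 ≤ n < 0x110000 outside the surrogate range D800–DFFF (Lean Char cannot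
-- hold a lone surrogate; such escapes are excluded by Pre_); none = ValueError, as Python chr.
def pyChr? (n : Int) : Option Char :=
  if 0 ≤ n ∧ n < 1114112 then some (Char.ofNat n.toNat) else none

-- chr(int(cs, 16)): shared by both ports because both Pythons run exactly this parse.
def pyChrHex16 (cs : List Char) : Option Char :=
  (PySem.Int.ofCharsBase? cs 16).bind pyChr?

-- A's while-loop over the index i, as structural recursion on the remaining suffix.
def goA : List Char → List Char
  | [] => []
  | c :: rest =>
    if 6 ≤ (c :: rest).length ∧ c = '\\' ∧ rest.head? = some 'u' then
      match pyChrHex16 (((c :: rest).drop 2).take 4) with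
      | some ch => ch :: goA ((c :: rest).drop 6)
      | none => c :: goA rest
    else c :: goA rest
termination_by l => l.length
decreasing_by all_goals simp

def convert_unicode_to_chinese (unicode_str : String) : String :=
  String.ofList (goA unicode_str.toList)

-- ===== PORT B =====
-- B's while True loop: the index i becomes the dropped prefix, s.find('\u', i) becomes find on the suffix.
def goB (l : List Char) : List Char :=
  if hj : PySem.Chars.find l ['\\', 'u'] = -1 then l
  else
    l.take (PySem.Chars.find l ['\\', 'u']).toNat ++
      (if (PySem.Chars.find l ['\\', 'u']).toNat + 5 < l.length then
        match pyChrHex16 ((l.drop ((PySem.Chars.find l ['\\', 'u']).toNat + 2)).take 4) with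
        | some ch => ch :: goB (l.drop ((PySem.Chars.find l ['\\', 'u']).toNat + 6))
        | none => '\\' :: goB (l.drop ((PySem.Chars.find l ['\\', 'u']).toNat + 1))
      else '\\' :: goB (l.drop ((PySem.Chars.find l ['\\', 'u']).toNat + 1)))
termination_by l.length
decreasing_by
  all_goals
    have h2 : (['\\', 'u'] : List Char) <:+: l := (PySem.Chars.find_ne_neg_one_iff l ['\\', 'u']).mp hj
    have h3 : 2 ≤ l.length := h2.length_le
    simp; omega

def convert_unicode_to_chinese_alt (unicode_str : String) : String :=
  String.ofList (goB unicode_str.toList)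

-- ===== PRECONDITION & SPEC =====
-- Pre_ excludes strings containing a well-formed \uXXXX escape whose value is a lone surrogate
-- (D800–DFFF): Python A returns a string with a lone surrogate there, a value no Lean String can hold.
def Pre_convert_unicode_to_chinese (unicode_str : String) : Prop :=
  ∀ j < unicode_str.toList.length, j + 5 < unicode_str.toList.length →
    (unicode_str.toList.drop j).take 2 = ['\\', 'u'] →
    ((PySem.Int.ofCharsBase? ((unicode_str.toList.drop (j + 2)).take 4) 16).all
      (fun v => decide (v < 55296 ∨ 57343 < v))) = true
instance (unicode_str : String) : Decidable (Pre_convert_unicode_to_chinese unicode_str) := by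
  unfold Pre_convert_unicode_to_chinese; infer_instance

def pvWitness_convert_unicode_to_chinese : String := "ab\\u4e2dc\\u12"

def Spec_convert_unicode_to_chinese (unicode_str : String) (out : String) : Prop := out = convert_unicode_to_chinese_alt unicode_str
instance (unicode_str : String) (out : String) : Decidable (Spec_convert_unicode_to_chinese unicode_str out) := by unfold Spec_convert_unicode_to_chinese; infer_instance

-- ===== CLAIM (what is proved, stated in full; the proofs are below) =====
def Claim_equal_convert_unicode_to_chinese : Prop := ∀ (unicode_str : String), Dom_convert_unicode_to_chinese unicode_str → Pre_convert_unicode_to_chinese unicode_str → Spec_convert_unicode_to_chinese unicode_str (convert_unicode_to_chinese unicode_str)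

-- ===== LEMMAS AND PROOFS =====

-- A copies verbatim across a region in which no "\u" occurrence starts.
lemma goA_copy (pre suf : List Char)
    (h : ∀ k < pre.length, ¬ (['\\', 'u'] : List Char) <+: (pre ++ suf).drop k) :
    goA (pre ++ suf) = pre ++ goA suf := by
  induction pre with
  | nil => simp
  | cons c pre' ih =>
    have h0 := h 0 (by simp)
    rw [List.cons_append, goA]
    have hcond : ¬ (6 ≤ (c :: (pre' ++ suf)).length ∧ c = '\\' ∧ (pre' ++ suf).head? = some 'u') := by
      rintro ⟨-, hc, hu⟩
      apply h0
      cases hpq : pre' ++ suf with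
      | nil => simp [hpq] at hu
      | cons d tl =>
        simp [hpq] at hu
        subst hc hu
        simp [hpq, List.prefix_iff_eq_take]
    rw [if_neg hcond, ih (fun k hk => by
      have := h (k + 1) (by simp; omega)
      simpa using this)]
    simp

-- A is the identity on occurrence-free strings.
lemma goA_id (l : List Char) (h : ¬ (['\\', 'u'] : List Char) <:+: l) : goA l = l := by
  have h0 : goA [] = [] := by rw [goA]
  have hc : ∀ k < l.length, ¬ (['\\', 'u'] : List Char) <+: (l ++ []).drop k := by
    intro k _ hp
    rw [List.append_nil] at hp
    exact h (hp.isInfix.trans (List.drop_suffix k l).isInfix)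
  have := goA_copy l [] hc
  rw [List.append_nil, h0, List.append_nil] at this
  exact this

-- Main equivalence, by strong induction on the length.
lemma goA_eq_goB : ∀ n (l : List Char), l.length ≤ n → goA l = goB l := by
  intro n
  induction n with
  | zero =>
    intro l hl
    have : l = [] := List.eq_nil_of_length_eq_zero (Nat.le_zero.mp hl)
    subst this
    rw [goB, dif_pos (by decide : PySem.Chars.find ([] : List Char) ['\\', 'u'] = -1), goA]
  | succ n ih =>
    intro l hl
    rw [goB]
    by_cases hj : PySem.Chars.find l ['\\', 'u'] = -1
    · rw [dif_pos hj]
      exact goA_id l ((PySem.Chars.find_eq_neg_one_iff l _).mp hj)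
    · rw [dif_neg hj]
      have hnn : 0 ≤ PySem.Chars.find l ['\\', 'u'] := by
        have := PySem.Chars.neg_one_le_find l ['\\', 'u']
        omega
      set jn := (PySem.Chars.find l ['\\', 'u']).toNat with hjn
      obtain ⟨hpref, hmin⟩ := PySem.Chars.find_spec (s := l) (sub := ['\\', 'u']) hnn
      obtain ⟨r, hr⟩ : ∃ r, l.drop jn = '\\' :: 'u' :: r := by
        obtain ⟨t, ht⟩ := hpref
        exact ⟨t, by simpa using ht.symm⟩
      have hlen2 : jn + 2 ≤ l.length := by
        have := congrArg List.length hr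
        simp at this
        omega
    -- split l at jn and copy the prefix
      have hsplit : l = l.take jn ++ l.drop jn := (List.take_append_drop jn l).symm
      have hcopy : goA l = l.take jn ++ goA (l.drop jn) := by
        conv_lhs => rw [hsplit]
        rw [goA_copy]
        intro k hk
        have hkjn : k < jn := by
          have : (l.take jn).length = jn := by simp; omega
          omega
        rw [← hsplit]
        exact hmin k hkjn
      rw [hcopy, hr]
      have hdroplen : (l.drop jn).length = l.length - jn := by simp
      rw [goA]
      have hlen6 : (6 ≤ ('\\' :: 'u' :: r).length) ↔ jn + 5 < l.length := by
        rw [← hr]; simp; omega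
      by_cases h6 : jn + 5 < l.length
      · rw [if_pos ⟨hlen6.mpr h6, rfl, rfl⟩]
        have hr2 : l.drop (jn + 2) = r := by
          have : l.drop (jn + 2) = (l.drop jn).drop 2 := by rw [List.drop_drop]
          rw [this, hr]; rfl
        rw [if_pos h6, hr2]
        have htake : ((('\\' :: 'u' :: r) : List Char).drop 2).take 4 = r.take 4 := rfl
        rw [htake]
        cases hch : pyChrHex16 (r.take 4) with
        | some ch =>
          have hr6 : (('\\' :: 'u' :: r) : List Char).drop 6 = l.drop (jn + 6) := by
            have : l.drop (jn + 6) = (l.drop (jn + 2)).drop 4 := by rw [List.drop_drop]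
            rw [this, hr2]; rfl
          rw [hr6, ih (l.drop (jn + 6)) (by simp; omega)]
        | none =>
          have hr1 : ('u' :: r : List Char) = l.drop (jn + 1) := by
            have : l.drop (jn + 1) = (l.drop jn).drop 1 := by rw [List.drop_drop]
            rw [this, hr]; rfl
          rw [hr1, ih (l.drop (jn + 1)) (by simp; omega)]
      · rw [if_neg (fun hcc => h6 (hlen6.mp hcc.1)), if_neg h6]
        have hr1 : ('u' :: r : List Char) = l.drop (jn + 1) := by
          have : l.drop (jn + 1) = (l.drop jn).drop 1 := by rw [List.drop_drop]
          rw [this, hr]; rfl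
        rw [hr1, ih (l.drop (jn + 1)) (by simp; omega)]

-- ===== VERDICT (by name: the statement is the Claim_ definition above) =====
theorem convert_unicode_to_chinese_spec : Claim_equal_convert_unicode_to_chinese := by
  intro s _ _
  show convert_unicode_to_chinese s = convert_unicode_to_chinese_alt s
  unfold convert_unicode_to_chinese convert_unicode_to_chinese_alt
  rw [goA_eq_goB s.toList.length s.toList le_rfl]
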